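-- pv_equiv track=rewrite | github.com/ttzytt/PyAutoGrade | tests/Block 4/tested_code/24/Unit 1/List functions/list_functions.py | weird_double
-- ===== SOURCE A (Python) =====
-- def weird_double(numbers):
--     if len(numbers) == 0:
--         return None
--
--
--     i = 0
--
--     while i < len(numbers):
--
--         if numbers[i] % 3 == 0:
--             i += 4
--
--         elif numbers[i] % 3 != 0:
--             numbers[i] *= 2
--             i += 1
--     return numbers
-- ===== SOURCE B (Python) =====
-- def weird_double(numbers):
--     if not numbers:
--         return None
--     res = []
--     it = iter(numbers)
--     for x in it:
--         if x % 3 == 0: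
--             res.append(x)
--             for _ in range(3):
--                 y = next(it, None)
--                 if y is None:
--                     break
--                 res.append(y)
--         else:
--             res.append(x * 2)
--     numbers[:] = res
--     return numbers
-- ===== Notes on version B (the rewrite author's own statement) =====
-- stated objective: alternative
-- what changed: Replaced A's in-place index walk with variable stride (i += 4 on multiples of 3, else double and i += 1) by a single pass that consumes an iterator, copying a multiple of 3 plus up to 3 following elements unchanged and doubling otherwise, building a fresh result list that is written back; both mutate the argument list in place identically.
import Mathlib
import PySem

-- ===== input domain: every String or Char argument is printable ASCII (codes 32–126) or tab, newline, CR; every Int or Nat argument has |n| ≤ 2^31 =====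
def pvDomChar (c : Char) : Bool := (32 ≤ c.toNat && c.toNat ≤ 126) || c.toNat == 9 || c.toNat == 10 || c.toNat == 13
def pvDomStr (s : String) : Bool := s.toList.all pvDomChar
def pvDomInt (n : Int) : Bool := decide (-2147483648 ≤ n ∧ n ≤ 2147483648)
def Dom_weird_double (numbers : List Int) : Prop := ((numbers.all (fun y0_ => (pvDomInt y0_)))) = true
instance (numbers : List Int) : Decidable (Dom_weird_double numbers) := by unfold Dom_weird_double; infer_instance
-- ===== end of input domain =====

-- B replaces A's variable-stride index walk by slicing chunks off the front and rebuilding the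
-- list front-to-back (objective: alternative). Both Pythons mutate the argument list in place
-- identically; the equivalence proved here is about the RETURN value.

-- ===== PORT A =====
-- A's while loop: index i walks the list, jumping by 4 on multiples of 3, doubling otherwise
def weirdDoubleLoopA (xs : List Int) (i : Nat) : List Int :=
  if _h : i < xs.length then
    if PySem.Int.mod (xs.getD i 0) 3 = 0 then
      weirdDoubleLoopA xs (i + 4)
    else
      weirdDoubleLoopA (xs.set i (xs.getD i 0 * 2)) (i + 1)
  else xs
termination_by xs.length - i
decreasing_by
  · omega
  · simp only [List.length_set]; omega

def weird_double (numbers : List Int) : Option (List Int) :=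
  if numbers.length = 0 then none
  else some (weirdDoubleLoopA numbers 0)

-- ===== PORT B =====
-- B's for loop over the iterator: the iterator's remaining elements are the list `rest`; the
-- inner for/next loop that copies up to 3 further elements into res is rest'.take 3 / rest'.drop 3
def weirdDoubleLoopB (res rest : List Int) : List Int :=
  match rest with
  | [] => res
  | x :: rest' =>
    if PySem.Int.mod x 3 = 0 then
      weirdDoubleLoopB (res ++ x :: rest'.take 3) (rest'.drop 3)
    else
      weirdDoubleLoopB (res ++ [x * 2]) rest'
termination_by rest.length
decreasing_by all_goals simp

def weird_double_alt (numbers : List Int) : Option (List Int) :=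
  if numbers = [] then none
  else some (weirdDoubleLoopB [] numbers)

-- ===== PRECONDITION & SPEC =====
def Spec_weird_double (numbers : List Int) (out : Option (List Int)) : Prop := out = weird_double_alt numbers
instance (numbers : List Int) (out : Option (List Int)) : Decidable (Spec_weird_double numbers out) := by unfold Spec_weird_double; infer_instance

-- ===== CLAIM (what is proved, stated in full; the proofs are below) =====
def Claim_equal_weird_double : Prop := ∀ (numbers : List Int), Dom_weird_double numbers → Spec_weird_double numbers (weird_double numbers)

-- ===== LEMMAS AND PROOFS =====

-- B's accumulator distributes over append
theorem weirdDoubleLoopB_acc (n : Nat) : ∀ (rest res : List Int), rest.length ≤ n →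
    weirdDoubleLoopB res rest = res ++ weirdDoubleLoopB [] rest := by
  induction n with
  | zero =>
      intro rest res h
      have : rest = [] := by cases rest <;> simp_all
      subst this; simp [weirdDoubleLoopB]
  | succ m ih =>
      intro rest res h
      match rest with
      | [] => simp [weirdDoubleLoopB]
      | x :: rest' =>
        rw [weirdDoubleLoopB, weirdDoubleLoopB]
        by_cases hm : PySem.Int.mod x 3 = 0
        · simp only [hm, if_true, List.nil_append]
          rw [ih _ (res ++ x :: rest'.take 3) (by simp at h ⊢; omega),
              ih _ (x :: rest'.take 3) (by simp at h ⊢; omega)]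
          simp [List.append_assoc]
        · simp only [hm, if_false, List.nil_append]
          rw [ih rest' _ (by simp at h ⊢; omega), ih rest' [x*2] (by simp at h ⊢; omega)]
          simp

-- setting index i only rewrites the (i+1)-prefix, splitting it as prefix ++ new element
theorem take_succ_set (xs : List Int) (i : Nat) (h : i < xs.length) (v : Int) :
    (xs.set i v).take (i+1) = xs.take i ++ [v] := by
  apply List.ext_getElem
  · simp; omega
  · intro j h1 h2
    simp only [List.getElem_take, List.getElem_set]
    by_cases hj : j = i
    · subst hj; simp [List.getElem_append_right, Nat.min_eq_left h.le]
    · have hji : j < i := by simp at h1; omega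
      have hlt : j < (xs.take i).length := by simp; omega
      simp only [List.getElem_append_left hlt, List.getElem_take]
      rw [if_neg (by omega)]

-- main invariant: A's in-place walk from index i equals the untouched prefix plus B's rebuild of the suffix
theorem loopA_eq_loopB (fuel : Nat) : ∀ (xs : List Int) (i : Nat), xs.length ≤ i + fuel →
    weirdDoubleLoopA xs i = xs.take i ++ weirdDoubleLoopB [] (xs.drop i) := by
  induction fuel with
  | zero =>
      intro xs i hle
      rw [weirdDoubleLoopA]
      have h : ¬ i < xs.length := by omega
      simp [h, List.drop_eq_nil_of_le (by omega : xs.length ≤ i), weirdDoubleLoopB,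
        List.take_of_length_le (by omega : xs.length ≤ i)]
  | succ n ih =>
      intro xs i hle
      rw [weirdDoubleLoopA]
      by_cases h : i < xs.length
      · simp only [h, dif_pos]
        have hdrop : xs.drop i = xs[i] :: xs.drop (i + 1) := List.drop_eq_getElem_cons h
        have hget : xs.getD i 0 = xs[i] := List.getD_eq_getElem xs 0 h
        by_cases hm : PySem.Int.mod (xs.getD i 0) 3 = 0
        · simp only [hm, if_pos]
          rw [ih xs (i + 4) (by omega)]
          conv_rhs => rw [hdrop, weirdDoubleLoopB]
          rw [hget] at hm
          simp only [hm, if_pos, List.nil_append]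
          rw [List.drop_drop, show i + 1 + 3 = i + 4 by omega,
              weirdDoubleLoopB_acc (xs.length) (xs.drop (i+4)) (xs[i] :: (xs.drop (i+1)).take 3) (by simp; try omega),
              List.take_add, hdrop, List.take_succ_cons]
          simp [List.append_assoc]
        · simp only [hm, if_neg, not_false_iff]
          rw [ih (xs.set i (xs.getD i 0 * 2)) (i + 1) (by simp; omega)]
          rw [hget] at hm ⊢
          have hset_drop : (xs.set i (xs[i] * 2)).drop (i + 1) = xs.drop (i + 1) := by
            rw [List.drop_set]; simp
          rw [hset_drop, take_succ_set xs i h]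
          conv_rhs => rw [hdrop, weirdDoubleLoopB]
          simp only [hm, if_neg, not_false_iff, List.nil_append]
          rw [weirdDoubleLoopB_acc (xs.length) _ _ (by simp; try omega),
              weirdDoubleLoopB_acc (xs.length) (xs.drop (i+1)) [xs[i] * 2] (by simp; try omega)]
          simp
      · simp only [h, dif_neg, not_false_iff]
        simp [List.drop_eq_nil_of_le (by omega : xs.length ≤ i), weirdDoubleLoopB,
          List.take_of_length_le (by omega : xs.length ≤ i)]

-- ===== VERDICT (by name: the statement is the Claim_ definition above) =====
theorem weird_double_spec : Claim_equal_weird_double := by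
  intro numbers _
  unfold Spec_weird_double weird_double weird_double_alt
  by_cases h : numbers = []
  · simp [h]
  · have hlen : numbers.length ≠ 0 := by simpa using h
    simp only [hlen, if_neg, h, not_false_iff]
    rw [loopA_eq_loopB numbers.length numbers 0 (by omega)]
    simp
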